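-- pv_equiv track=rewrite | github.com/abbasmoosajee07/AlgoVault | Codyssi/2024/02/CodyssiDay02.py | count_true_outputs
-- ===== SOURCE A (Python) =====
-- def count_true_outputs(sensor_outputs):
--     total_true = sensor_outputs.count("TRUE")  # Start with sensor TRUEs
--     current_layer = sensor_outputs.copy()
--     layer_index = 0
--
--     while len(current_layer) > 1:
--         next_layer = []
--         for i in range(0, len(current_layer) - 1, 2):
--             out1, out2 = current_layer[i], current_layer[i + 1]
--             is_even_gate = (i // 2 + 1) % 2 == 0  # 1-based index for gates
--
--             if is_even_gate:  # OR gate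
--                 result = "TRUE" if "TRUE" in (out1, out2) else "FALSE"
--             else:  # AND gate
--                 result = "TRUE" if out1 == "TRUE" and out2 == "TRUE" else "FALSE"
--
--             next_layer.append(result)
--             if result == "TRUE":
--                 total_true += 1
--
--         # If there's an odd one out, carry it forward
--         if len(current_layer) % 2 == 1:
--             next_layer.append(current_layer[-1])
--
--         current_layer = next_layer
--         layer_index += 1
--
--     return total_true
-- ===== SOURCE B (Python) =====
-- def count_true_outputs(sensor_outputs):
--     return sensor_outputs.count("TRUE") + _reduce(sensor_outputs)
--
--
-- def _gate(g, a, b):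
--     # gate g (1-based within its layer): even -> OR, odd -> AND
--     if g % 2 == 0:
--         return "TRUE" if a == "TRUE" or b == "TRUE" else "FALSE"
--     return "TRUE" if a == "TRUE" and b == "TRUE" else "FALSE"
--
--
-- def _reduce(layer):
--     # consume one full layer; recursion depth is logarithmic in len(layer)
--     if len(layer) <= 1:
--         return 0
--     it = iter(layer)
--     gates = [_gate(g, a, b) for g, (a, b) in enumerate(zip(it, it), start=1)]
--     tail = [layer[-1]] if len(layer) % 2 else []
--     return gates.count("TRUE") + _reduce(gates + tail)
-- ===== Notes on version B (the rewrite author's own statement) =====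
-- stated objective: alternative
-- what changed: Replaces A's while-loop with an index-range inner loop and a running total by a recursion over layers that forms consecutive pairs with zip(it, it), builds each layer's gate results as an enumerate-based comprehension and counts that layer's TRUEs with .count at the end.
import Mathlib
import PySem

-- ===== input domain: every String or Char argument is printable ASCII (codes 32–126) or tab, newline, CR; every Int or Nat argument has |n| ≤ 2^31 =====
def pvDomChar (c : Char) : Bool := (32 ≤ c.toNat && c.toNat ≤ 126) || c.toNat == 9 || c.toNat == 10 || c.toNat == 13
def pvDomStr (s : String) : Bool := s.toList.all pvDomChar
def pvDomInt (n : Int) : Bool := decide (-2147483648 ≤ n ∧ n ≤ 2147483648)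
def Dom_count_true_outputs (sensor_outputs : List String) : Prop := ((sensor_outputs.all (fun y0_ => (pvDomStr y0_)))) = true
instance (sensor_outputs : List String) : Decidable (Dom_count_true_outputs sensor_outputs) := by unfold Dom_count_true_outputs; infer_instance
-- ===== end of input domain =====

-- B replaces A's while-loop/index-range reduction with a recursion over layers that pairs
-- elements structurally (zip-style) and counts each layer's gate results at the end ('alternative').

-- ===== PORT A =====
-- one pass of the inner 'for i in range(0, len-1, 2)' body; indices are always in range here
def aStep (layer : List String) (st : List String × Int) (i : Int) : List String × Int :=
  let out1 := PySem.List.pyGetD layer i ""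
  let out2 := PySem.List.pyGetD layer (i + 1) ""
  let isEvenGate := PySem.Int.mod (PySem.Int.floordiv i 2 + 1) 2 == 0
  let result := if isEvenGate then (if out1 == "TRUE" || out2 == "TRUE" then "TRUE" else "FALSE")
                else (if out1 == "TRUE" && out2 == "TRUE" then "TRUE" else "FALSE")
  (st.1 ++ [result], if result == "TRUE" then st.2 + 1 else st.2)

-- the while-loop; each iteration at least halves the layer, so length is sufficient fuel
def aLoop : Nat → List String → Int → Int
  | 0, _, total => total
  | fuel + 1, layer, total =>
    if layer.length > 1 then
      let st := (PySem.List.pyRange 0 ((layer.length : Int) - 1) 2).foldl (aStep layer) ([], total)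
      let next := if layer.length % 2 == 1 then st.1 ++ [PySem.List.pyGetD layer (-1) ""] else st.1
      aLoop fuel next st.2
    else total

def count_true_outputs (sensor_outputs : List String) : Int :=
  aLoop sensor_outputs.length sensor_outputs (PySem.List.count sensor_outputs "TRUE" : Nat)

-- ===== PORT B =====
-- zip(it, it): consecutive disjoint pairs, dropping a lone tail
def pairsOf : List String → List (String × String)
  | a :: b :: rest => (a, b) :: pairsOf rest
  | _ => []

def gateB (g : Int) (a b : String) : String :=
  if PySem.Int.mod g 2 == 0 then (if a == "TRUE" || b == "TRUE" then "TRUE" else "FALSE")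
  else (if a == "TRUE" && b == "TRUE" then "TRUE" else "FALSE")

-- the comprehension '[_gate(g, a, b) for g, (a, b) in enumerate(zip(it, it), start=1)]'
def gatesOf (layer : List String) : List String :=
  (PySem.List.enumerate (pairsOf layer) 1).map (fun p => gateB p.1 p.2.1 p.2.2)

theorem pairsOf_length : ∀ l : List String, (pairsOf l).length = l.length / 2
  | [] => by simp [pairsOf]
  | [_] => by simp [pairsOf]
  | _ :: _ :: r => by simp [pairsOf, pairsOf_length r]; omega

theorem gatesOf_length (l : List String) : (gatesOf l).length = l.length / 2 := by
  simp [gatesOf, PySem.List.length_enumerate, pairsOf_length]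

def bReduce (layer : List String) : Int :=
  if layer.length ≤ 1 then 0
  else
    let gates := gatesOf layer
    let tail := if layer.length % 2 == 1 then [PySem.List.pyGetD layer (-1) ""] else []
    (gates.count "TRUE" : Nat) + bReduce (gates ++ tail)
termination_by layer.length
decreasing_by
  have := gatesOf_length layer
  simp only [List.length_append]
  split <;> simp_all <;> omega

def count_true_outputs_alt (sensor_outputs : List String) : Int :=
  (PySem.List.count sensor_outputs "TRUE" : Nat) + bReduce sensor_outputs

-- ===== PRECONDITION & SPEC =====
def Spec_count_true_outputs (sensor_outputs : List String) (out : Int) : Prop := out = count_true_outputs_alt sensor_outputs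
instance (sensor_outputs : List String) (out : Int) : Decidable (Spec_count_true_outputs sensor_outputs out) := by unfold Spec_count_true_outputs; infer_instance

-- ===== CLAIM (what is proved, stated in full; the proofs are below) =====
def Claim_equal_count_true_outputs : Prop := ∀ (sensor_outputs : List String), Dom_count_true_outputs sensor_outputs → Spec_count_true_outputs sensor_outputs (count_true_outputs sensor_outputs)

-- ===== LEMMAS AND PROOFS =====

theorem pyRange_two_eq_nil (a b : Int) (h : b ≤ a) : PySem.List.pyRange a b 2 = [] := by
  rw [PySem.List.pyRange_of_pos a b (by norm_num)]
  simp [show ¬ a < b by omega]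

theorem pyRange_two_cons (a b : Int) (h : a < b) :
    PySem.List.pyRange a b 2 = a :: PySem.List.pyRange (a + 2) b 2 := by
  rw [PySem.List.pyRange_of_pos a b (by norm_num), PySem.List.pyRange_of_pos (a + 2) b (by norm_num)]
  simp only [if_pos h]
  by_cases h2 : a + 2 < b
  · rw [if_pos h2]
    have hn : ((b - a + 2 - 1) / 2).toNat = ((b - (a + 2) + 2 - 1) / 2).toNat + 1 := by omega
    rw [hn, List.range_succ_eq_map, List.map_cons, List.map_map]
    congr 1
    · simp
    · apply List.map_congr_left
      intro k _
      simp only [Function.comp_apply, Nat.succ_eq_add_one]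
      push_cast
      ring
  · rw [if_neg h2]
    have hn : ((b - a + 2 - 1) / 2).toNat = 1 := by omega
    rw [hn]
    simp

theorem fold_gate : ∀ (R P acc : List String) (t : Int) (k : Nat), P.length = 2 * k →
    ((PySem.List.pyRange (2 * (k : Int)) (((P ++ R).length : Int) - 1) 2).foldl (aStep (P ++ R)) (acc, t))
    = (acc ++ (PySem.List.enumerate (pairsOf R) ((k : Int) + 1)).map (fun p => gateB p.1 p.2.1 p.2.2),
       t + (((PySem.List.enumerate (pairsOf R) ((k : Int) + 1)).map (fun p => gateB p.1 p.2.1 p.2.2)).count "TRUE" : Nat))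
  | [], P, acc, t, k, hP => by
    rw [pyRange_two_eq_nil _ _ (by simp [hP]; try omega)]
    simp [pairsOf]
  | [x], P, acc, t, k, hP => by
    rw [pyRange_two_eq_nil _ _ (by simp [hP]; try omega)]
    simp [pairsOf]
  | a :: b :: r, P, acc, t, k, hP => by
    have hlt : 2 * (k : Int) < ((P ++ a :: b :: r).length : Int) - 1 := by
      simp only [List.length_append, List.length_cons]; push_cast; omega
    have hi1 : PySem.List.pyGetD (P ++ a :: b :: r) (2 * (k : Int)) "" = a := by
      rw [show (2 * (k : Int)) = ((2 * k : Nat) : Int) by push_cast; ring,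
        PySem.List.pyGetD_natCast, List.getD_eq_getElem?_getD,
        List.getElem?_append_right (by omega)]
      simp [hP]
    have hi2 : PySem.List.pyGetD (P ++ a :: b :: r) (2 * (k : Int) + 1) "" = b := by
      rw [show (2 * (k : Int) + 1) = ((2 * k + 1 : Nat) : Int) by push_cast; ring,
        PySem.List.pyGetD_natCast, List.getD_eq_getElem?_getD,
        List.getElem?_append_right (by omega)]
      simp [hP]
    have hfd : PySem.Int.floordiv (2 * (k : Int)) 2 = (k : Int) := by
      rw [PySem.Int.floordiv_eq_ediv_of_pos (by norm_num)]; omega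
    rw [pyRange_two_cons _ _ hlt, List.foldl_cons]
    have hstep : aStep (P ++ a :: b :: r) (acc, t) (2 * (k : Int))
        = (acc ++ [gateB ((k : Int) + 1) a b], if gateB ((k : Int) + 1) a b == "TRUE" then t + 1 else t) := by
      simp only [aStep, gateB, hi1, hi2, hfd]
      rfl
    rw [hstep]
    have hP' : (P ++ [a, b]).length = 2 * (k + 1) := by simp [hP]; omega
    have IH := fold_gate r (P ++ [a, b]) (acc ++ [gateB ((k : Int) + 1) a b])
      (if gateB ((k : Int) + 1) a b == "TRUE" then t + 1 else t) (k + 1) hP'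
    simp only [List.append_assoc, List.cons_append, List.nil_append] at IH
    push_cast at IH
    rw [show (2 : Int) * ((k : Int) + 1) = 2 * (k : Int) + 2 by ring] at IH
    rw [IH]
    simp only [pairsOf, PySem.List.enumerate_cons, List.map_cons, List.count_cons]
    refine Prod.ext rfl ?_
    push_cast
    split <;> ring

theorem bReduce_eq (L : List String) (h : ¬ L.length ≤ 1) :
    bReduce L = ((gatesOf L).count "TRUE" : Nat)
      + bReduce (gatesOf L ++ (if L.length % 2 == 1 then [PySem.List.pyGetD L (-1) ""] else [])) := by
  rw [bReduce]
  simp [h]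

theorem fold_gate0 (L : List String) (t : Int) :
    ((PySem.List.pyRange 0 (((L.length : Int)) - 1) 2).foldl (aStep L) ([], t))
    = (gatesOf L, t + ((gatesOf L).count "TRUE" : Nat)) := by
  have h := fold_gate L [] [] t 0 (by simp)
  simpa [gatesOf] using h

theorem aLoop_eq : ∀ (fuel : Nat) (L : List String) (t : Int), L.length ≤ fuel →
    aLoop fuel L t = t + bReduce L := by
  intro fuel
  induction fuel with
  | zero =>
    intro L t h
    have : L = [] := by cases L <;> simp_all
    subst this
    simp [aLoop, bReduce]
  | succ fuel ih =>
    intro L t h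
    by_cases h1 : L.length ≤ 1
    · rw [aLoop, bReduce]
      simp [show ¬ L.length > 1 by omega, h1]
    · rw [aLoop]
      simp only [show L.length > 1 by omega, if_pos]
      rw [fold_gate0]
      have hnext : (if L.length % 2 == 1 then gatesOf L ++ [PySem.List.pyGetD L (-1) ""] else gatesOf L)
          = gatesOf L ++ (if L.length % 2 == 1 then [PySem.List.pyGetD L (-1) ""] else []) := by
        split <;> simp
      rw [hnext]
      have hlen : (gatesOf L ++ (if L.length % 2 == 1 then [PySem.List.pyGetD L (-1) ""] else [])).length ≤ fuel := by
        have := gatesOf_length L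
        simp only [List.length_append]
        split <;> simp_all <;> omega
      rw [ih _ _ hlen]
      conv_rhs => rw [bReduce_eq L h1]
      ring

-- ===== VERDICT (by name: the statement is the Claim_ definition above) =====
theorem count_true_outputs_spec : Claim_equal_count_true_outputs := by
  intro l _
  unfold Spec_count_true_outputs count_true_outputs count_true_outputs_alt
  exact aLoop_eq l.length l _ (le_refl _)
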